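-- pv_equiv track=rewrite | github.com/devmacrile/euler | solutions/python/problem28.py | diagonal_generator
-- ===== SOURCE A (Python) =====
-- def diagonal_generator(seed, max_value):
--     level = 1
--     current_value = seed
--     yield seed  # initially yield the single center value
--     while current_value < max_value:
--         for i in range(4):
--             next_value = current_value + (2 * level)
--             yield next_value
--             current_value = next_value
--         level += 1
-- ===== SOURCE B (Python) =====
-- def _isqrt(n):
--     # floor integer square root of n >= 0, by scanning: largest r with r*r <= n
--     r = 0
--     while (r + 1) * (r + 1) <= n:
--         r += 1
--     return r
--
--
-- def diagonal_generator(seed, max_value):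
--     # Staged: solve the termination inequality up front (ring count from an integer
--     # square root), then emit every value by closed formula over bounded ranges.
--     yield seed
--     m = max_value - seed
--     if m > 0:
--         rings = (_isqrt(m) + 1) // 2
--         for k in range(1, rings + 1):
--             for j in range(1, 5):
--                 yield seed + 4 * (k - 1) * k + 2 * j * k
-- ===== Notes on version B (the rewrite author's own statement) =====
-- stated objective: alternative
-- what changed: B separates termination from generation: it solves the stopping inequality up front (ring count rings=(isqrt(max_value-seed)+1)//2 via an integer square root), then emits all values by closed formula over bounded for-ranges, whereas A threads a running accumulator and re-tests the bound every ring.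
import Mathlib
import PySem

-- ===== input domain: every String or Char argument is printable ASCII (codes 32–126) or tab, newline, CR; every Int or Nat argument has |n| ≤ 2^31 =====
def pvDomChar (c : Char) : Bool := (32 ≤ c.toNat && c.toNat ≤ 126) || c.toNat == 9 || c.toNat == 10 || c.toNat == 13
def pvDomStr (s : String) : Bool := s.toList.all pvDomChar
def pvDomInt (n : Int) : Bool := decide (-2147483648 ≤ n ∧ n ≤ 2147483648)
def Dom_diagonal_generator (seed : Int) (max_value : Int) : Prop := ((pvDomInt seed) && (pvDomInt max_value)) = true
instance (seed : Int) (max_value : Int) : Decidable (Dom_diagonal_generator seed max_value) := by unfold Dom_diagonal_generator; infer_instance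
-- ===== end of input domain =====

-- B computes the ring count up front from an integer square root and then emits all values by closed formula over bounded ranges (alternative decomposition; same cost). A is a generator; both ports return the list of yielded values.


-- ===== PORT A =====
-- loopA: A's while loop. Parameter n encodes level = n+1; cur is current_value; the
-- four yields of 'for i in range(4)' are written out in order. fuel is only a totality
-- guard: each pass raises cur by 2*(n+1) ≥ 2, so fuel = (max_value - seed).toNat + 1
-- (supplied at the call site) is never exhausted before the while-condition fails.
def loopA (fuel : Nat) (max_value : Int) (cur : Int) (n : Nat) : List Int :=
  match fuel with
  | 0 => []
  | fuel + 1 =>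
    if cur < max_value then
      let lev : Int := (n : Int) + 1
      let v1 := cur + 2 * lev
      let v2 := v1 + 2 * lev
      let v3 := v2 + 2 * lev
      let v4 := v3 + 2 * lev
      v1 :: v2 :: v3 :: v4 :: loopA fuel max_value v4 (n + 1)
    else []

def diagonal_generator (seed : Int) (max_value : Int) : List Int :=
  seed :: loopA ((max_value - seed).toNat + 1) max_value seed 0

-- ===== PORT B =====
-- isqrtLoop: Source B's _isqrt scanning loop 'while (r+1)*(r+1) <= n: r += 1'.
-- fuel is only a totality guard (r never exceeds n), supplied as n.toNat + 1.
def isqrtLoop (fuel : Nat) (n : Int) (r : Int) : Int :=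
  match fuel with
  | 0 => r
  | fuel + 1 => if (r + 1) * (r + 1) ≤ n then isqrtLoop fuel n (r + 1) else r

def pyIsqrt (n : Int) : Int := isqrtLoop (n.toNat + 1) n 0

def diagonal_generator_alt (seed : Int) (max_value : Int) : List Int :=
  let m := max_value - seed
  seed ::
    (if 0 < m then
      let rings := PySem.Int.floordiv (pyIsqrt m + 1) 2
      (PySem.List.pyRange 1 (rings + 1) 1).flatMap (fun k =>
        (PySem.List.pyRange 1 5 1).map (fun j => seed + 4 * (k - 1) * k + 2 * j * k))
    else [])

-- ===== PRECONDITION & SPEC =====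
def Spec_diagonal_generator (seed : Int) (max_value : Int) (out : List Int) : Prop := out = diagonal_generator_alt seed max_value
instance (seed : Int) (max_value : Int) (out : List Int) : Decidable (Spec_diagonal_generator seed max_value out) := by unfold Spec_diagonal_generator; infer_instance

-- ===== CLAIM (what is proved, stated in full; the proofs are below) =====
def Claim_equal_diagonal_generator : Prop := ∀ (seed : Int) (max_value : Int), Dom_diagonal_generator seed max_value → Spec_diagonal_generator seed max_value (diagonal_generator seed max_value)

-- ===== LEMMAS AND PROOFS =====

-- isqrtLoop computes the floor square root, given the invariant r*r ≤ n and enough fuel.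
lemma isqrtLoop_spec (n : Int) : ∀ (fuel : Nat) (r : Int), 0 ≤ r → r * r ≤ n →
    n.toNat + 1 - r.toNat ≤ fuel →
    0 ≤ isqrtLoop fuel n r ∧ isqrtLoop fuel n r * isqrtLoop fuel n r ≤ n ∧
      n < (isqrtLoop fuel n r + 1) * (isqrtLoop fuel n r + 1) := by
  intro fuel
  induction fuel with
  | zero =>
    intro r hr hrr hfuel
    exfalso
    have hrn : r ≤ n := by nlinarith
    have h0n : 0 ≤ n := le_trans (by nlinarith) hrr
    omega
  | succ fuel ih =>
    intro r hr hrr hfuel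
    simp only [isqrtLoop]
    split_ifs with h
    · exact ih (r + 1) (by omega) h (by omega)
    · exact ⟨hr, hrr, by omega⟩

lemma pyIsqrt_spec (n : Int) (hn : 0 ≤ n) :
    0 ≤ pyIsqrt n ∧ pyIsqrt n * pyIsqrt n ≤ n ∧ n < (pyIsqrt n + 1) * (pyIsqrt n + 1) := by
  exact isqrtLoop_spec n (n.toNat + 1) 0 le_rfl (by omega) (by omega)

-- Main loop correspondence: starting at ring n (cur = seed + 4n(n+1)) with K total
-- rings, A's while loop produces exactly B's formula-based emission for rings n+1..K.
lemma loopA_rings (seed max_value K : Int)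
    (hstop : max_value ≤ seed + 4 * K * (K + 1))
    (hcont : ∀ j : Int, 0 ≤ j → j < K → seed + 4 * j * (j + 1) < max_value) :
    ∀ (c n : Nat) (fuel : Nat), (n : Int) + (c : Int) = K → c < fuel →
    loopA fuel max_value (seed + 4 * (n : Int) * ((n : Int) + 1)) n =
      (PySem.List.pyRange ((n : Int) + 1) (K + 1) 1).flatMap (fun k =>
        (PySem.List.pyRange 1 5 1).map (fun j => seed + 4 * (k - 1) * k + 2 * j * k)) := by
  intro c
  induction c with
  | zero =>
    intro n fuel hK hfuel
    obtain ⟨f, rfl⟩ : ∃ f, fuel = f + 1 := ⟨fuel - 1, by omega⟩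
    have hn : (n : Int) = K := by omega
    rw [show PySem.List.pyRange ((n : Int) + 1) (K + 1) 1 = [] from
      PySem.List.pyRange_one_eq_nil (by omega)]
    simp only [loopA, List.flatMap_nil]
    rw [if_neg (by rw [hn]; omega)]
  | succ c ih =>
    intro n fuel hK hfuel
    obtain ⟨f, rfl⟩ : ∃ f, fuel = f + 1 := ⟨fuel - 1, by omega⟩
    have hnK : (n : Int) < K := by omega
    have hlt : seed + 4 * (n : Int) * ((n : Int) + 1) < max_value :=
      hcont n (by positivity) hnK
    rw [show PySem.List.pyRange ((n : Int) + 1) (K + 1) 1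
        = ((n : Int) + 1) :: PySem.List.pyRange ((n : Int) + 1 + 1) (K + 1) 1 from
      PySem.List.pyRange_one_cons (by omega)]
    simp only [loopA, if_pos hlt, List.flatMap_cons]
    have hrange : PySem.List.pyRange 1 5 1 = [1, 2, 3, 4] := by decide
    have hrec : seed + 4 * (n : Int) * ((n : Int) + 1) + 2 * ((n : Int) + 1)
        + 2 * ((n : Int) + 1) + 2 * ((n : Int) + 1) + 2 * ((n : Int) + 1)
        = seed + 4 * ((n + 1 : Nat) : Int) * (((n + 1 : Nat) : Int) + 1) := by push_cast; ring
    rw [hrec, ih (n + 1) f (by push_cast; omega) (by omega), hrange]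
    simp only [List.map_cons, List.map_nil, List.cons_append, List.nil_append,
      List.cons.injEq]
    push_cast
    refine ⟨by ring, by ring, by ring, by ring, ?_⟩
    rw [show (n : Int) + 1 + 1 = (n : Int) + 2 by ring]

-- ===== VERDICT (by name: the statement is the Claim_ definition above) =====
theorem diagonal_generator_spec : Claim_equal_diagonal_generator := by
  intro seed max_value _
  unfold Spec_diagonal_generator diagonal_generator diagonal_generator_alt
  simp only []
  set m := max_value - seed with hm
  by_cases hpos : 0 < m
  · rw [if_pos hpos]
    obtain ⟨hu0, hu1, hu2⟩ := pyIsqrt_spec m (by omega)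
    set u := pyIsqrt m with hu
    set K := PySem.Int.floordiv (u + 1) 2 with hKdef
    have hKdiv : K = (u + 1) / 2 := by
      rw [hKdef]; exact PySem.Int.floordiv_eq_ediv_of_pos (by omega)
    have hK2 : 2 * K ≤ u + 1 ∧ u + 1 < 2 * K + 2 := by rw [hKdiv]; omega
    have hstop : max_value ≤ seed + 4 * K * (K + 1) := by nlinarith [hK2.1, hK2.2]
    have hu1' : 1 ≤ u := by nlinarith
    have hKpos : 0 < K := by omega
    have hcont : ∀ j : Int, 0 ≤ j → j < K → seed + 4 * j * (j + 1) < max_value := by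
      intro j hj0 hjK
      have h2j : 2 * j + 1 ≤ u := by omega
      nlinarith
    have hKm : K ≤ m := by nlinarith
    have := loopA_rings seed max_value K hstop hcont K.toNat 0 (m.toNat + 1)
      (by omega) (by omega)
    simp only [Nat.cast_zero] at this
    rw [show seed + 4 * (0 : Int) * ((0 : Int) + 1) = seed by ring,
      show (0 : Int) + 1 = 1 by ring] at this
    rw [this]
  · rw [if_neg hpos]
    have : ¬ seed < max_value := by omega
    simp only [loopA, if_neg this]
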